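-- pv_equiv track=rewrite | github.com/cyberLaVoy/algorithms-notebook | python/Fibonacci_fast_doubling.py | getOrderOfOperations
-- ===== SOURCE A (Python) =====
-- def getOrderOfOperations(n):
--     order = []
--     temp = n
--     while temp != 1:
--         if temp & 1 == 1:
--             order.append(1) # incrementing signal
--             temp -= 1
--         else:
--             order.append(0) # fast doubling signal
--             temp //= 2
--     return order
-- ===== SOURCE B (Python) =====
-- def getOrderOfOperations(n):
--     order = []
--     for b in bin(n)[3:]:  # bits after the leading 1, MSB to LSB
--         order.append(0)
--         if b == '1':
--             order.append(1)
--     order.reverse()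
--     return order
-- ===== Notes on version B (the rewrite author's own statement) =====
-- stated objective: simpler
-- what changed: A repeatedly halves/decrements n in a while loop to emit the signal list; B reads n's binary representation once (bin(n)), emits signals per bit MSB-to-LSB in one for loop, and reverses.
-- outside the precondition, e.g. on getOrderOfOperations(0): A does not finish within the time limit, B returns []; on getOrderOfOperations(-2): A does not finish within the time limit, B returns [0, 1, 0]
import Mathlib
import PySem

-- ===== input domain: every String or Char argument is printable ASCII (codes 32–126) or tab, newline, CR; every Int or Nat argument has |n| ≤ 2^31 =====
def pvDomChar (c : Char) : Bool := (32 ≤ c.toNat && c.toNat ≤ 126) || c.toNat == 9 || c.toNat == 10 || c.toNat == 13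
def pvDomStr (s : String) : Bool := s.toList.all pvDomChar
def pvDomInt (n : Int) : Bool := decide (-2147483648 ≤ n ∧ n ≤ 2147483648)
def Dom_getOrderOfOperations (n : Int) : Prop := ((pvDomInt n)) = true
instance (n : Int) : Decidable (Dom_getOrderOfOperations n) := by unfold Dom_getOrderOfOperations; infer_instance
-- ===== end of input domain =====

-- B builds the answer from n's binary digits in one pass instead of A's repeated subtract/halve loop;
-- objective: simpler. A never returns (infinite loop) for n ≤ 0, so Pre_ requires 1 ≤ n.

-- ===== PORT A =====
-- A's while loop; the `temp ≤ 0` guard only makes the recursion total (Python diverges there,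
-- outside Pre_). For positive temp, Lean `% 2` and `/ 2` agree with Python `& 1` and `// 2`.
def getOrderOfOperationsLoop (temp : Int) (order : List Int) : List Int :=
  if h0 : temp ≤ 0 then order
  else if temp = 1 then order
  else if temp % 2 = 1 then getOrderOfOperationsLoop (temp - 1) (order ++ [1])
  else getOrderOfOperationsLoop (temp / 2) (order ++ [0])
termination_by temp.toNat
decreasing_by
  · omega
  · have : 2 ≤ temp := by omega
    have h1 : temp / 2 < temp := by omega
    have h2 : 0 < temp / 2 := by omega
    omega

def getOrderOfOperations (n : Int) : List Int :=
  getOrderOfOperationsLoop n []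

-- ===== PORT B =====
-- binary digits of m, most significant first (bin(m) for m ≥ 1; [] for m = 0)
def pvBits (m : Nat) : List Nat :=
  if m = 0 then [] else pvBits (m / 2) ++ [m % 2]

def getOrderOfOperations_alt (n : Int) : List Int :=
  let order := ((pvBits n.toNat).drop 1).foldl
    (fun acc b => if b = 1 then acc ++ [0] ++ [1] else acc ++ [0]) []
  order.reverse

-- ===== PRECONDITION & SPEC =====
-- A's loop never terminates for n ≤ 0 (Python returns no value there).
def Pre_getOrderOfOperations (n : Int) : Prop := 1 ≤ n
instance (n : Int) : Decidable (Pre_getOrderOfOperations n) := by unfold Pre_getOrderOfOperations; infer_instance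
def pvWitness_getOrderOfOperations : Int := (6)

def Spec_getOrderOfOperations (n : Int) (out : List Int) : Prop := out = getOrderOfOperations_alt n
instance (n : Int) (out : List Int) : Decidable (Spec_getOrderOfOperations n out) := by unfold Spec_getOrderOfOperations; infer_instance

-- ===== CLAIM (what is proved, stated in full; the proofs are below) =====
def Claim_equal_getOrderOfOperations : Prop := ∀ (n : Int), Dom_getOrderOfOperations n → Pre_getOrderOfOperations n → Spec_getOrderOfOperations n (getOrderOfOperations n)

-- ===== LEMMAS AND PROOFS =====

-- one-step equations for A's loop
theorem loop_stop (temp : Int) (order : List Int) (h : temp ≤ 0) :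
    getOrderOfOperationsLoop temp order = order := by
  rw [getOrderOfOperationsLoop, dif_pos h]

theorem loop_one (order : List Int) : getOrderOfOperationsLoop 1 order = order := by
  rw [getOrderOfOperationsLoop]; norm_num

theorem loop_odd (temp : Int) (order : List Int) (h0 : ¬ temp ≤ 0) (h1 : temp ≠ 1)
    (ho : temp % 2 = 1) :
    getOrderOfOperationsLoop temp order = getOrderOfOperationsLoop (temp - 1) (order ++ [1]) := by
  rw [getOrderOfOperationsLoop, dif_neg h0, if_neg h1, if_pos ho]

theorem loop_even (temp : Int) (order : List Int) (h0 : ¬ temp ≤ 0) (h1 : temp ≠ 1)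
    (ho : ¬ temp % 2 = 1) :
    getOrderOfOperationsLoop temp order = getOrderOfOperationsLoop (temp / 2) (order ++ [0]) := by
  rw [getOrderOfOperationsLoop, dif_neg h0, if_neg h1, if_neg ho]

-- the loop's accumulator is a prefix
theorem loop_acc_fuel (k : Nat) : ∀ (temp : Int), temp.toNat ≤ k → ∀ (order : List Int),
    getOrderOfOperationsLoop temp order = order ++ getOrderOfOperationsLoop temp [] := by
  induction k with
  | zero =>
      intro temp h order
      have h0 : temp ≤ 0 := by omega
      rw [loop_stop _ _ h0, loop_stop _ _ h0]
      simp
  | succ k ih =>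
      intro temp h order
      by_cases h0 : temp ≤ 0
      · rw [loop_stop _ _ h0, loop_stop _ _ h0]; simp
      · by_cases h1 : temp = 1
        · subst h1; rw [loop_one, loop_one]; simp
        · by_cases ho : temp % 2 = 1
          · rw [loop_odd _ _ h0 h1 ho, loop_odd _ _ h0 h1 ho]
            have hk : (temp - 1).toNat ≤ k := by omega
            rw [ih _ hk, ih _ hk]
            simp
            rw [ih _ hk [1]]
            simp
          · rw [loop_even _ _ h0 h1 ho, loop_even _ _ h0 h1 ho]
            have hlt : temp / 2 < temp := by omega
            have hk : (temp / 2).toNat ≤ k := by omega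
            rw [ih _ hk, ih _ hk]
            simp
            rw [ih _ hk [0]]
            simp

theorem loop_acc (temp : Int) (order : List Int) :
    getOrderOfOperationsLoop temp order = order ++ getOrderOfOperationsLoop temp [] :=
  loop_acc_fuel temp.toNat temp le_rfl order

theorem alt_one : getOrderOfOperations_alt 1 = [] := by
  have hb0 : pvBits 0 = [] := by rw [pvBits]; norm_num
  have hb : pvBits 1 = [1] := by rw [pvBits]; norm_num [hb0]
  unfold getOrderOfOperations_alt
  norm_num [hb]

theorem pvBits_ne_nil (m : Nat) (h : m ≠ 0) : pvBits m ≠ [] := by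
  rw [pvBits]; simp [h]

theorem foldl_step (l : List Nat) (b : Nat) (acc : List Int) :
    (l ++ [b]).foldl (fun acc b => if b = 1 then acc ++ [0] ++ [1] else acc ++ [0]) acc
    = (l.foldl (fun acc b => if b = 1 then acc ++ [0] ++ [1] else acc ++ [0]) acc)
      ++ (if b = 1 then ([0, 1] : List Int) else [0]) := by
  rw [List.foldl_append]
  by_cases hb : b = 1 <;> simp [hb]

-- B satisfies A's recurrences
theorem alt_even (m : Nat) (h2 : 2 ≤ m) (he : m % 2 = 0) :
    getOrderOfOperations_alt (m : Int) = 0 :: getOrderOfOperations_alt ((m : Int) / 2) := by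
  have hm2 : (m : Int) / 2 = ((m / 2 : Nat) : Int) := by omega
  rw [getOrderOfOperations_alt, getOrderOfOperations_alt, hm2]
  simp only [Int.toNat_natCast]
  have hb : pvBits m = pvBits (m / 2) ++ [0] := by
    rw [pvBits]; simp [he]; omega
  have hne : pvBits (m / 2) ≠ [] := pvBits_ne_nil _ (by omega)
  rw [hb, List.drop_append_of_le_length (by cases hl : pvBits (m / 2) <;> simp_all)]
  rw [foldl_step]
  simp

theorem alt_odd (m : Nat) (h2 : 3 ≤ m) (ho : m % 2 = 1) :
    getOrderOfOperations_alt (m : Int) = 1 :: getOrderOfOperations_alt ((m : Int) - 1) := by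
  have hm1 : (m : Int) - 1 = ((m - 1 : Nat) : Int) := by omega
  rw [getOrderOfOperations_alt, getOrderOfOperations_alt, hm1]
  simp only [Int.toNat_natCast]
  have hb : pvBits m = pvBits (m / 2) ++ [1] := by
    rw [pvBits]; simp [ho]; omega
  have hb1 : pvBits (m - 1) = pvBits (m / 2) ++ [0] := by
    rw [pvBits]
    have : (m - 1) / 2 = m / 2 := by omega
    have : (m - 1) % 2 = 0 := by omega
    simp_all; omega
  have hne : pvBits (m / 2) ≠ [] := pvBits_ne_nil _ (by omega)
  rw [hb, hb1]
  rw [List.drop_append_of_le_length (by cases hl : pvBits (m / 2) <;> simp_all),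
      List.drop_append_of_le_length (by cases hl : pvBits (m / 2) <;> simp_all)]
  rw [foldl_step, foldl_step]
  simp

theorem loop_eq_alt (m : Nat) (h : 1 ≤ m) :
    getOrderOfOperationsLoop (m : Int) [] = getOrderOfOperations_alt (m : Int) := by
  induction m using Nat.strong_induction_on with
  | _ m ih =>
    by_cases h1 : m = 1
    · subst h1
      have : ((1 : Nat) : Int) = 1 := by norm_num
      rw [this, loop_one, alt_one]
    · have hle : ¬ ((m : Int) ≤ 0) := by omega
      have hne1 : (m : Int) ≠ 1 := by omega
      by_cases ho : m % 2 = 1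
      · -- odd, m ≥ 3
        have h3 : 3 ≤ m := by omega
        have hmo : (m : Int) % 2 = 1 := by omega
        rw [loop_odd _ _ hle hne1 hmo, loop_acc]
        have hm1 : (m : Int) - 1 = ((m - 1 : Nat) : Int) := by omega
        rw [hm1, ih (m - 1) (by omega) (by omega), alt_odd m h3 ho, hm1]
        simp
      · -- even, m ≥ 2
        have he : m % 2 = 0 := by omega
        have h2 : 2 ≤ m := by omega
        have hmo : ¬ ((m : Int) % 2 = 1) := by omega
        rw [loop_even _ _ hle hne1 hmo, loop_acc]
        have hm2 : (m : Int) / 2 = ((m / 2 : Nat) : Int) := by omega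
        rw [hm2, ih (m / 2) (by omega) (by omega), alt_even m h2 he, hm2]
        simp

-- ===== VERDICT (by name: the statement is the Claim_ definition above) =====
theorem getOrderOfOperations_spec : Claim_equal_getOrderOfOperations := by
  intro n _ hpre
  unfold Pre_getOrderOfOperations at hpre
  unfold Spec_getOrderOfOperations getOrderOfOperations
  have hn : n = ((n.toNat : Nat) : Int) := by omega
  rw [hn]
  exact loop_eq_alt n.toNat (by omega)
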